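-- pv_equiv track=rewrite | github.com/sxyseo/devflow | devflow/docs/generator.py | _format_changes_for_readme
-- ===== SOURCE A (Python) =====
-- from typing import List, Dict, Any, Optional
--
-- def _format_changes_for_readme(changes: List[Any]) -> str:
--     """
--     Format code changes for README documentation.
--
--     Args:
--         changes: List of code changes
--
--     Returns:
--         Formatted changes as Markdown
--     """
--     if not changes:
--         return ""
--
--     lines = []
--
--     # Group changes by type
--     added = []
--     modified = []
--     removed = []
--
--     for change in changes:
--         if isinstance(change, dict):
--             change_type = change.get("type", "").lower()
--             change_desc = change.get("description", "")
--
--             if change_type == "added":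
--                 added.append(change_desc)
--             elif change_type == "modified":
--                 modified.append(change_desc)
--             elif change_type == "removed":
--                 removed.append(change_desc)
--         elif isinstance(change, str):
--             # Simple string changes, treat as additions
--             added.append(change)
--
--     # Format changes by type
--     if added:
--         lines.append("### Added")
--         lines.append("")
--         for item in added:
--             lines.append(f"- {item}")
--         lines.append("")
--
--     if modified:
--         lines.append("### Modified")
--         lines.append("")
--         for item in modified:
--             lines.append(f"- {item}")
--         lines.append("")
--
--     if removed:
--         lines.append("### Removed")
--         lines.append("")
--         for item in removed:
--             lines.append(f"- {item}")
--         lines.append("")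
--
--     return "\n".join(lines).strip()
-- ===== SOURCE B (Python) =====
-- from typing import List, Any
--
-- def _format_changes_for_readme(changes: List[Any]) -> str:
--     """Format code changes for README documentation (category-scan rewrite)."""
--     sections = []
--     for type_name, header in (("added", "### Added"),
--                               ("modified", "### Modified"),
--                               ("removed", "### Removed")):
--         items = [c.get("description", "") if isinstance(c, dict) else c
--                  for c in changes
--                  if (isinstance(c, dict)
--                      and c.get("type", "").lower() == type_name)
--                  or (type_name == "added" and isinstance(c, str))]
--         if items:
--             sections.append(header + "\n\n" + "\n".join("- " + i for i in items))
--     return "\n\n".join(sections).strip()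
-- ===== Notes on version B (the rewrite author's own statement) =====
-- stated objective: simpler
-- what changed: B replaces A's single-pass grouping into three accumulators plus hand-maintained blank-line bookkeeping by an ordered table of (type, header) category specs, one filter pass over changes per category, each section built as one string and the sections joined with '\n\n'.
import Mathlib
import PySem

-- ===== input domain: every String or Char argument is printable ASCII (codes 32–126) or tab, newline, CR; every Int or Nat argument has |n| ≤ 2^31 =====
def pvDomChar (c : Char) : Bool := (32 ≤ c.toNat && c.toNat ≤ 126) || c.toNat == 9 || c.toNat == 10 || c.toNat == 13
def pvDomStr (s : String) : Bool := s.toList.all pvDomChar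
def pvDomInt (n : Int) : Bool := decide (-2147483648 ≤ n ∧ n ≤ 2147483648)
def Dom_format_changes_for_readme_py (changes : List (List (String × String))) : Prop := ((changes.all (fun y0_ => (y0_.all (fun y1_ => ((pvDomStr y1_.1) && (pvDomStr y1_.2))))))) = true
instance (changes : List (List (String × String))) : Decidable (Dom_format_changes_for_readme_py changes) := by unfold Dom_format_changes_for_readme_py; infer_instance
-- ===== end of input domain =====

-- B replaces A's one-pass three-accumulator grouping by an ordered category-spec table with one
-- filter pass per category, building each section as a single string joined by "\n\n" (objective:
-- simpler — no blank-line bookkeeping). Return-value equivalence only; neither mutates its argument.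

-- ===== PORT A =====
-- literal transliteration of A; under the type convention every change is a dict, so the
-- isinstance(change, str) branch of A is unreachable and is not represented.
def format_changes_for_readme_py (changes : List (List (String × String))) : String :=
  if changes = [] then ""
  else
    let grouped : List String × List String × List String :=
      changes.foldl (fun acc change =>
        let changeType := PySem.Str.lower ((PySem.Dict.mk change).getD "type" "")
        let changeDesc := (PySem.Dict.mk change).getD "description" ""
        if changeType = "added" then (acc.1 ++ [changeDesc], acc.2.1, acc.2.2)
        else if changeType = "modified" then (acc.1, acc.2.1 ++ [changeDesc], acc.2.2)
        else if changeType = "removed" then (acc.1, acc.2.1, acc.2.2 ++ [changeDesc])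
        else acc) ([], [], [])
    let lines : List String :=
      (if grouped.1 ≠ [] then ["### Added", ""] ++ grouped.1.map (fun item => "- " ++ item) ++ [""] else [])
      ++ (if grouped.2.1 ≠ [] then ["### Modified", ""] ++ grouped.2.1.map (fun item => "- " ++ item) ++ [""] else [])
      ++ (if grouped.2.2 ≠ [] then ["### Removed", ""] ++ grouped.2.2.map (fun item => "- " ++ item) ++ [""] else [])
    PySem.Str.strip (PySem.Str.join "\n" lines)

-- ===== PORT B =====
-- literal transliteration of Source B (every change is a dict here, so the isinstance(c, str)
-- disjunct of the 'added' filter is unreachable and is not represented).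
def format_changes_for_readme_py_alt (changes : List (List (String × String))) : String :=
  let specs : List (String × String) :=
    [("added", "### Added"), ("modified", "### Modified"), ("removed", "### Removed")]
  let sections : List String :=
    specs.foldl (fun acc spec =>
      let items : List String :=
        (changes.filter (fun c => PySem.Str.lower ((PySem.Dict.mk c).getD "type" "") = spec.1)).map
          (fun c => (PySem.Dict.mk c).getD "description" "")
      if items = [] then acc
      else acc ++ [spec.2 ++ "\n\n" ++ PySem.Str.join "\n" (items.map (fun item => "- " ++ item))]) []
  PySem.Str.strip (PySem.Str.join "\n\n" sections)

-- ===== PRECONDITION & SPEC =====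
def Spec_format_changes_for_readme_py (changes : List (List (String × String))) (out : String) : Prop := out = format_changes_for_readme_py_alt changes
instance (changes : List (List (String × String))) (out : String) : Decidable (Spec_format_changes_for_readme_py changes out) := by unfold Spec_format_changes_for_readme_py; infer_instance

-- ===== CLAIM (what is proved, stated in full; the proofs are below) =====
def Claim_equal_format_changes_for_readme_py : Prop := ∀ (changes : List (List (String × String))), Dom_format_changes_for_readme_py changes → Spec_format_changes_for_readme_py changes (format_changes_for_readme_py changes)

-- ===== LEMMAS AND PROOFS =====

-- descriptions of the changes of one category, in input order (the common value both ports group by)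
def pvCat (t : String) (l : List (List (String × String))) : List String :=
  (l.filter (fun c => PySem.Str.lower ((PySem.Dict.mk c).getD "type" "") = t)).map
    (fun c => (PySem.Dict.mk c).getD "description" "")

-- A's one-pass grouping fold = B's three filter passes
lemma pv_grp (l : List (List (String × String))) (acc : List String × List String × List String) :
    l.foldl (fun acc change =>
        let changeType := PySem.Str.lower ((PySem.Dict.mk change).getD "type" "")
        let changeDesc := (PySem.Dict.mk change).getD "description" ""
        if changeType = "added" then (acc.1 ++ [changeDesc], acc.2.1, acc.2.2)
        else if changeType = "modified" then (acc.1, acc.2.1 ++ [changeDesc], acc.2.2)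
        else if changeType = "removed" then (acc.1, acc.2.1, acc.2.2 ++ [changeDesc])
        else acc) acc
      = (acc.1 ++ pvCat "added" l, acc.2.1 ++ pvCat "modified" l, acc.2.2 ++ pvCat "removed" l) := by
  induction l generalizing acc with
  | nil => simp [pvCat]
  | cons c l ih =>
    simp only [List.foldl_cons]
    split_ifs with h1 h2 h3 <;>
      simp [pvCat, *, List.append_assoc]

lemma pv_join_app (sep : List Char) (xs ys : List (List Char)) (hx : xs ≠ []) (hy : ys ≠ []) :
    PySem.Chars.join sep (xs ++ ys) = PySem.Chars.join sep xs ++ sep ++ PySem.Chars.join sep ys := by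
  induction xs with
  | nil => exact absurd rfl hx
  | cons x xs ih =>
    cases xs with
    | nil =>
      cases ys with
      | nil => exact absurd rfl hy
      | cons y ys => simp [PySem.Chars.join_cons_cons, PySem.Chars.join_singleton]
    | cons x' xs' =>
      have := ih (by simp)
      simp only [List.cons_append, PySem.Chars.join_cons_cons] at *
      simp [this, List.append_assoc]

lemma pv_strip_snoc (cs : List Char) : PySem.Chars.strip (cs ++ ['\n']) = PySem.Chars.strip cs := by
  by_cases h : List.dropWhile PySem.Chars.isspace cs = []
  · simp [PySem.Chars.strip, PySem.Chars.lstrip, PySem.Chars.rstrip, List.dropWhile_append, h,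
      PySem.Chars.isspace]
  · simp [PySem.Chars.strip, PySem.Chars.lstrip, PySem.Chars.rstrip, List.dropWhile_append, h,
      PySem.Chars.isspace]

-- one section's A-side line block joins to its B-side section string plus a trailing newline
lemma pv_blk_join (h : List Char) (xs : List (List Char)) (hx : xs ≠ []) :
    PySem.Chars.join ['\n'] ([h, []] ++ xs ++ [[]])
      = (h ++ ['\n'] ++ ['\n'] ++ PySem.Chars.join ['\n'] xs) ++ ['\n'] := by
  rw [List.append_assoc, pv_join_app ['\n'] [h, []] (xs ++ [[]]) (by simp) (by simp),
      pv_join_app ['\n'] xs [[]] hx (by simp)]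
  simp [PySem.Chars.join_cons_cons, PySem.Chars.join_singleton, List.append_assoc]

lemma pv_case1 (S : List Char) (B : List (List Char))
    (h : PySem.Chars.join ['\n'] B = S ++ ['\n']) :
    PySem.Chars.strip (PySem.Chars.join ['\n'] B)
      = PySem.Chars.strip (PySem.Chars.join ['\n', '\n'] [S]) := by
  rw [h, PySem.Chars.join_singleton, pv_strip_snoc]

lemma pv_case2 (S1 S2 : List Char) (B1 B2 : List (List Char))
    (hb1 : B1 ≠ []) (hb2 : B2 ≠ [])
    (h1 : PySem.Chars.join ['\n'] B1 = S1 ++ ['\n'])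
    (h2 : PySem.Chars.join ['\n'] B2 = S2 ++ ['\n']) :
    PySem.Chars.strip (PySem.Chars.join ['\n'] (B1 ++ B2))
      = PySem.Chars.strip (PySem.Chars.join ['\n', '\n'] [S1, S2]) := by
  rw [pv_join_app ['\n'] B1 B2 hb1 hb2, h1, h2,
      PySem.Chars.join_cons_cons, PySem.Chars.join_singleton]
  have : S1 ++ ['\n'] ++ ['\n'] ++ (S2 ++ ['\n']) = (S1 ++ ['\n', '\n'] ++ S2) ++ ['\n'] := by
    simp [List.append_assoc]
  rw [this, pv_strip_snoc]

lemma pv_case3 (S1 S2 S3 : List Char) (B1 B2 B3 : List (List Char))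
    (hb1 : B1 ≠ []) (hb2 : B2 ≠ []) (hb3 : B3 ≠ [])
    (h1 : PySem.Chars.join ['\n'] B1 = S1 ++ ['\n'])
    (h2 : PySem.Chars.join ['\n'] B2 = S2 ++ ['\n'])
    (h3 : PySem.Chars.join ['\n'] B3 = S3 ++ ['\n']) :
    PySem.Chars.strip (PySem.Chars.join ['\n'] (B1 ++ B2 ++ B3))
      = PySem.Chars.strip (PySem.Chars.join ['\n', '\n'] [S1, S2, S3]) := by
  rw [List.append_assoc, pv_join_app ['\n'] B1 (B2 ++ B3) hb1 (by cases B2 <;> simp_all),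
      pv_join_app ['\n'] B2 B3 hb2 hb3, h1, h2, h3,
      PySem.Chars.join_cons_cons, PySem.Chars.join_cons_cons, PySem.Chars.join_singleton]
  have : S1 ++ ['\n'] ++ ['\n'] ++ (S2 ++ ['\n'] ++ ['\n'] ++ (S3 ++ ['\n']))
      = (S1 ++ ['\n', '\n'] ++ (S2 ++ ['\n', '\n'] ++ S3)) ++ ['\n'] := by
    simp [List.append_assoc]
  rw [this, pv_strip_snoc]



lemma pvCat_eq (t : String) (l : List (List (String × String))) :
    List.map (fun c => (PySem.Dict.mk c).getD "description" "")
      (List.filter (fun c => decide (PySem.Str.lower ((PySem.Dict.mk c).getD "type" "") = t)) l)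
      = pvCat t l := rfl

lemma pv_nl : ("\n" : String).toList = ['\n'] := rfl
lemma pv_nl2 : ("\n\n" : String).toList = ['\n', '\n'] := rfl
lemma pv_emp : ("" : String).toList = ([] : List Char) := rfl

-- composite char-level case lemmas (A-side line block(s) vs B-side section string(s))
lemma pv_c1 (h : List Char) (xs : List (List Char)) (hx : xs ≠ []) :
    PySem.Chars.strip (PySem.Chars.join ['\n'] ([h, []] ++ (xs ++ [[]])))
      = PySem.Chars.strip (PySem.Chars.join ['\n', '\n']
          [h ++ (['\n', '\n'] ++ PySem.Chars.join ['\n'] xs)]) := by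
  refine pv_case1 _ _ ?_
  rw [show ([h, []] ++ (xs ++ [[]])) = [h, []] ++ xs ++ [[]] from by simp,
      pv_blk_join h xs hx]
  simp [List.append_assoc]

lemma pv_c2 (h1 h2 : List Char) (x1 x2 : List (List Char)) (hx1 : x1 ≠ []) (hx2 : x2 ≠ []) :
    PySem.Chars.strip (PySem.Chars.join ['\n'] (([h1, []] ++ (x1 ++ [[]])) ++ ([h2, []] ++ (x2 ++ [[]]))))
      = PySem.Chars.strip (PySem.Chars.join ['\n', '\n']
          [h1 ++ (['\n', '\n'] ++ PySem.Chars.join ['\n'] x1),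
           h2 ++ (['\n', '\n'] ++ PySem.Chars.join ['\n'] x2)]) := by
  refine pv_case2 _ _ _ _ (by simp) (by simp) ?_ ?_ <;>
    rw [show ∀ (h : List Char) (xs : List (List Char)), ([h, []] ++ (xs ++ [[]])) = [h, []] ++ xs ++ [[]] from by simp] <;>
    first
      | (rw [pv_blk_join h1 x1 hx1]; simp [List.append_assoc])
      | (rw [pv_blk_join h2 x2 hx2]; simp [List.append_assoc])

lemma pv_c3 (h1 h2 h3 : List Char) (x1 x2 x3 : List (List Char))
    (hx1 : x1 ≠ []) (hx2 : x2 ≠ []) (hx3 : x3 ≠ []) :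
    PySem.Chars.strip (PySem.Chars.join ['\n']
        (([h1, []] ++ (x1 ++ [[]])) ++ (([h2, []] ++ (x2 ++ [[]])) ++ ([h3, []] ++ (x3 ++ [[]])))))
      = PySem.Chars.strip (PySem.Chars.join ['\n', '\n']
          [h1 ++ (['\n', '\n'] ++ PySem.Chars.join ['\n'] x1),
           h2 ++ (['\n', '\n'] ++ PySem.Chars.join ['\n'] x2),
           h3 ++ (['\n', '\n'] ++ PySem.Chars.join ['\n'] x3)]) := by
  rw [show (([h1, []] ++ (x1 ++ [[]])) ++ (([h2, []] ++ (x2 ++ [[]])) ++ ([h3, []] ++ (x3 ++ [[]]))))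
        = ([h1, []] ++ x1 ++ [[]]) ++ ([h2, []] ++ x2 ++ [[]]) ++ ([h3, []] ++ x3 ++ [[]]) from by
      simp [List.append_assoc]]
  refine pv_case3 _ _ _ _ _ _ (by simp) (by simp) (by simp) ?_ ?_ ?_ <;>
    first
      | (rw [pv_blk_join h1 x1 hx1]; simp [List.append_assoc])
      | (rw [pv_blk_join h2 x2 hx2]; simp [List.append_assoc])
      | (rw [pv_blk_join h3 x3 hx3]; simp [List.append_assoc])

-- String-level case lemmas, in the exact shapes the two ports produce
lemma pv_scase1 (hdr : String) (items : List String) (hi : items ≠ []) :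
    PySem.Str.strip (PySem.Str.join "\n" ([hdr, ""] ++ (items ++ [""])))
      = PySem.Str.strip (PySem.Str.join "\n\n" [hdr ++ ("\n\n" ++ PySem.Str.join "\n" items)]) := by
  refine String.toList_inj.mp ?_
  simp only [PySem.Str.toList_strip, PySem.Str.toList_join, List.map_append, List.map_cons,
    List.map_nil, String.toList_append, pv_nl, pv_nl2, pv_emp]
  exact pv_c1 hdr.toList (items.map String.toList) (by simpa using hi)

lemma pv_scase2 (h1 h2 : String) (i1 i2 : List String) (hi1 : i1 ≠ []) (hi2 : i2 ≠ []) :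
    PySem.Str.strip (PySem.Str.join "\n" (([h1, ""] ++ (i1 ++ [""])) ++ ([h2, ""] ++ (i2 ++ [""]))))
      = PySem.Str.strip (PySem.Str.join "\n\n"
          [h1 ++ ("\n\n" ++ PySem.Str.join "\n" i1), h2 ++ ("\n\n" ++ PySem.Str.join "\n" i2)]) := by
  refine String.toList_inj.mp ?_
  simp only [PySem.Str.toList_strip, PySem.Str.toList_join, List.map_append, List.map_cons,
    List.map_nil, String.toList_append, pv_nl, pv_nl2, pv_emp]
  exact pv_c2 h1.toList h2.toList (i1.map String.toList) (i2.map String.toList)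
    (by simpa using hi1) (by simpa using hi2)

lemma pv_scase3 (h1 h2 h3 : String) (i1 i2 i3 : List String)
    (hi1 : i1 ≠ []) (hi2 : i2 ≠ []) (hi3 : i3 ≠ []) :
    PySem.Str.strip (PySem.Str.join "\n"
        ((([h1, ""] ++ (i1 ++ [""])) ++ ([h2, ""] ++ (i2 ++ [""]))) ++ ([h3, ""] ++ (i3 ++ [""]))))
      = PySem.Str.strip (PySem.Str.join "\n\n"
          [h1 ++ ("\n\n" ++ PySem.Str.join "\n" i1), h2 ++ ("\n\n" ++ PySem.Str.join "\n" i2),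
           h3 ++ ("\n\n" ++ PySem.Str.join "\n" i3)]) := by
  rw [show ((([h1, ""] ++ (i1 ++ [""])) ++ ([h2, ""] ++ (i2 ++ [""]))) ++ ([h3, ""] ++ (i3 ++ [""])))
        = ([h1, ""] ++ (i1 ++ [""])) ++ (([h2, ""] ++ (i2 ++ [""])) ++ ([h3, ""] ++ (i3 ++ [""]))) from by
      simp [List.append_assoc]]
  refine String.toList_inj.mp ?_
  simp only [PySem.Str.toList_strip, PySem.Str.toList_join, List.map_append, List.map_cons,
    List.map_nil, String.toList_append, pv_nl, pv_nl2, pv_emp]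
  exact pv_c3 h1.toList h2.toList h3.toList (i1.map String.toList) (i2.map String.toList)
    (i3.map String.toList) (by simpa using hi1) (by simpa using hi2) (by simpa using hi3)

-- ===== VERDICT (by name: the statement is the Claim_ definition above) =====
set_option maxHeartbeats 1600000 in
theorem format_changes_for_readme_py_spec : Claim_equal_format_changes_for_readme_py := by
  intro changes _hdom
  unfold Spec_format_changes_for_readme_py
  unfold format_changes_for_readme_py format_changes_for_readme_py_alt
  by_cases hc : changes = []
  · subst hc; decide
  · simp only [if_neg hc, List.foldl_cons, List.foldl_nil, pv_grp, List.nil_append, pvCat_eq]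
    by_cases hA : pvCat "added" changes = [] <;>
      by_cases hM : pvCat "modified" changes = [] <;>
        by_cases hR : pvCat "removed" changes = [] <;>
          simp only [hA, hM, hR, ne_eq, not_true_eq_false, not_false_eq_true, if_neg, if_pos, List.map_nil, List.append_nil, List.nil_append]
    · rfl
    · exact pv_scase1 "### Removed" (List.map (fun item => "- " ++ item) (pvCat "removed" changes)) (by simpa using hR)
    · exact pv_scase1 "### Modified" (List.map (fun item => "- " ++ item) (pvCat "modified" changes)) (by simpa using hM)
    · exact pv_scase2 "### Modified" "### Removed"
        (List.map (fun item => "- " ++ item) (pvCat "modified" changes))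
        (List.map (fun item => "- " ++ item) (pvCat "removed" changes))
        (by simpa using hM) (by simpa using hR)
    · exact pv_scase1 "### Added" (List.map (fun item => "- " ++ item) (pvCat "added" changes)) (by simpa using hA)
    · exact pv_scase2 "### Added" "### Removed"
        (List.map (fun item => "- " ++ item) (pvCat "added" changes))
        (List.map (fun item => "- " ++ item) (pvCat "removed" changes))
        (by simpa using hA) (by simpa using hR)
    · exact pv_scase2 "### Added" "### Modified"
        (List.map (fun item => "- " ++ item) (pvCat "added" changes))
        (List.map (fun item => "- " ++ item) (pvCat "modified" changes))
        (by simpa using hA) (by simpa using hM)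
    · exact pv_scase3 "### Added" "### Modified" "### Removed"
        (List.map (fun item => "- " ++ item) (pvCat "added" changes))
        (List.map (fun item => "- " ++ item) (pvCat "modified" changes))
        (List.map (fun item => "- " ++ item) (pvCat "removed" changes))
        (by simpa using hA) (by simpa using hM) (by simpa using hR)
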